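-- pv_equiv track=rewrite | github.com/altakleos/sensei | src/sensei/engine/scripts/silence_ratio.py | _split_into_turns
-- ===== SOURCE A (Python) =====
-- _MENTOR_PREFIX = "[MENTOR]"
--
-- _LEARNER_PREFIX = "[LEARNER]"
--
-- def _strip_frontmatter(text: str) -> str:
--     """Strip a leading YAML frontmatter block if present."""
--     if not text.startswith("---\n"):
--         return text
--     end = text.find("\n---\n", 4)
--     if end < 0:
--         return text
--     return text[end + len("\n---\n"):]
--
-- def _split_into_turns(text: str) -> tuple[list[str], list[str]]:
--     """Walk the body and accumulate mentor and learner turn texts.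
--
--     Each `[MENTOR]` line opens a mentor turn; each `[LEARNER]` line opens
--     a learner turn. Lines without a marker are appended to whichever
--     turn is currently open. A new marker closes the previous turn.
--     """
--     body = _strip_frontmatter(text)
--     mentor_turns: list[str] = []
--     learner_turns: list[str] = []
--     current_kind: str | None = None
--     buffer: list[str] = []
--
--     def _flush() -> None:
--         if current_kind is None:
--             return
--         joined = "\n".join(buffer).strip()
--         if joined:
--             (mentor_turns if current_kind == "mentor" else learner_turns).append(joined)
--
--     for line in body.splitlines():
--         if line.startswith(_MENTOR_PREFIX):
--             _flush()
--             current_kind = "mentor"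
--             buffer = [line[len(_MENTOR_PREFIX):].lstrip()]
--         elif line.startswith(_LEARNER_PREFIX):
--             _flush()
--             current_kind = "learner"
--             buffer = [line[len(_LEARNER_PREFIX):].lstrip()]
--         elif current_kind is not None:
--             buffer.append(line)
--     _flush()
--     return mentor_turns, learner_turns
-- ===== SOURCE B (Python) =====
-- _MENTOR_PREFIX = "[MENTOR]"
--
-- _LEARNER_PREFIX = "[LEARNER]"
--
--
-- def _strip_frontmatter(text: str) -> str:
--     """Strip a leading YAML frontmatter block if present."""
--     if not text.startswith("---\n"):
--         return text
--     end = text.find("\n---\n", 4)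
--     if end < 0:
--         return text
--     return text[end + len("\n---\n"):]
--
--
-- def _split_into_turns(text: str) -> tuple[list[str], list[str]]:
--     """Group lines into (kind, lines) segments, then render each segment."""
--     # Pass 1: group the body's lines into segments, one per marker.
--     segments: list[tuple[str, list[str]]] = []
--     for line in _strip_frontmatter(text).splitlines():
--         if line.startswith(_MENTOR_PREFIX):
--             segments.append(("mentor", [line[len(_MENTOR_PREFIX):].lstrip()]))
--         elif line.startswith(_LEARNER_PREFIX):
--             segments.append(("learner", [line[len(_LEARNER_PREFIX):].lstrip()]))
--         elif segments:
--             segments[-1][1].append(line)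
--     # Pass 2: render each segment; keep only non-empty turns.
--     mentor_turns: list[str] = []
--     learner_turns: list[str] = []
--     for kind, lines in segments:
--         joined = "\n".join(lines).strip()
--         if joined:
--             (mentor_turns if kind == "mentor" else learner_turns).append(joined)
--     return mentor_turns, learner_turns
-- ===== Notes on version B (the rewrite author's own statement) =====
-- stated objective: alternative
-- what changed: Replaces the single stateful flush-on-boundary loop (current_kind/buffer/closure flush) with two passes: one that groups lines into (kind, lines) segments and one that joins/strips each segment into the output lists.
import Mathlib
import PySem

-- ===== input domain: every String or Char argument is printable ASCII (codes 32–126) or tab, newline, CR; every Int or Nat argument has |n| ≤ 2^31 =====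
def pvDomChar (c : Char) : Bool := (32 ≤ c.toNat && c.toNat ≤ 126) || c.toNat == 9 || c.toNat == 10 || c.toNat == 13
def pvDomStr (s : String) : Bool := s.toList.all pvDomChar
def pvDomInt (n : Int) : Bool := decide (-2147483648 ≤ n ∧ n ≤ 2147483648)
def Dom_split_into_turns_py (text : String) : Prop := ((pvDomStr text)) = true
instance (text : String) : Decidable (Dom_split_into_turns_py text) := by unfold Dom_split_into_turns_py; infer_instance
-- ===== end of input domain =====

-- B replaces A's single stateful flush-on-boundary loop by a grouping pass into
-- (kind, lines) segments followed by a rendering pass; same cost (objective: alternative).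

-- ===== PORT A =====
-- shared helper _strip_frontmatter (identical in Source A and Source B)
def pvStripFrontmatter (text : String) : String :=
  if !PySem.Str.startswith text "---\n" then text
  else
    let e := PySem.Str.findFrom text "\n---\n" 4 none
    if e < 0 then text
    else PySem.Str.slice text (some (e + 5)) none

-- A's closure _flush (reads current_kind/buffer/mentor_turns/learner_turns)
def pvFlushA (kind : Option Bool) (buffer m l : List String) : List String × List String :=
  match kind with
  | none => (m, l)
  | some k =>
    let joined := PySem.Str.strip (PySem.Str.join "\n" buffer)
    if joined = "" then (m, l)
    else if k then (m ++ [joined], l) else (m, l ++ [joined])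

-- A's for-loop over body.splitlines(), state (mentor, learner, current_kind, buffer)
def pvLoopA : List String → List String → List String → Option Bool → List String → List String × List String
  | [], m, l, kind, buffer => pvFlushA kind buffer m l
  | line :: rest, m, l, kind, buffer =>
    if PySem.Str.startswith line "[MENTOR]" then
      let p := pvFlushA kind buffer m l
      pvLoopA rest p.1 p.2 (some true) [PySem.Str.lstrip (PySem.Str.slice line (some 8) none)]
    else if PySem.Str.startswith line "[LEARNER]" then
      let p := pvFlushA kind buffer m l
      pvLoopA rest p.1 p.2 (some false) [PySem.Str.lstrip (PySem.Str.slice line (some 9) none)]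
    else
      match kind with
      | some _ => pvLoopA rest m l kind (buffer ++ [line])
      | none => pvLoopA rest m l kind buffer

def split_into_turns_py (text : String) : List String × List String :=
  pvLoopA (PySem.Str.splitlines (pvStripFrontmatter text)) [] [] none []

-- ===== PORT B =====
-- pass 1: each marker line opens a new (kind, [lstripped rest]) segment; other
-- lines append to the last segment (dropped when there is none yet)
def pvGroupStep (segs : List (Bool × List String)) (line : String) : List (Bool × List String) :=
  if PySem.Str.startswith line "[MENTOR]" then
    segs ++ [(true, [PySem.Str.lstrip (PySem.Str.slice line (some 8) none)])]
  else if PySem.Str.startswith line "[LEARNER]" then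
    segs ++ [(false, [PySem.Str.lstrip (PySem.Str.slice line (some 9) none)])]
  else
    match segs.getLast? with
    | none => segs
    | some (k, b) => segs.dropLast ++ [(k, b ++ [line])]

-- pass 2: render one segment and keep it if non-empty
def pvRenderStep (acc : List String × List String) (seg : Bool × List String) : List String × List String :=
  let joined := PySem.Str.strip (PySem.Str.join "\n" seg.2)
  if joined = "" then acc
  else if seg.1 then (acc.1 ++ [joined], acc.2) else (acc.1, acc.2 ++ [joined])

def split_into_turns_py_alt (text : String) : List String × List String :=
  let segs := (PySem.Str.splitlines (pvStripFrontmatter text)).foldl pvGroupStep []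
  segs.foldl pvRenderStep ([], [])

-- ===== PRECONDITION & SPEC =====
def Spec_split_into_turns_py (text : String) (out : List String × List String) : Prop := out = split_into_turns_py_alt text
instance (text : String) (out : List String × List String) : Decidable (Spec_split_into_turns_py text out) := by unfold Spec_split_into_turns_py; infer_instance

-- ===== CLAIM (what is proved, stated in full; the proofs are below) =====
def Claim_equal_split_into_turns_py : Prop := ∀ (text : String), Dom_split_into_turns_py text → Spec_split_into_turns_py text (split_into_turns_py text)

-- ===== LEMMAS AND PROOFS =====

-- specification of pass 1: the segments produced from an open segment (k, b)
def pvSegsOpen (k : Bool) (b : List String) : List String → List (Bool × List String)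
  | [] => [(k, b)]
  | line :: rest =>
    if PySem.Str.startswith line "[MENTOR]" then
      (k, b) :: pvSegsOpen true [PySem.Str.lstrip (PySem.Str.slice line (some 8) none)] rest
    else if PySem.Str.startswith line "[LEARNER]" then
      (k, b) :: pvSegsOpen false [PySem.Str.lstrip (PySem.Str.slice line (some 9) none)] rest
    else pvSegsOpen k (b ++ [line]) rest

-- segments produced before any marker has been seen
def pvSegsNone : List String → List (Bool × List String)
  | [] => []
  | line :: rest =>
    if PySem.Str.startswith line "[MENTOR]" then
      pvSegsOpen true [PySem.Str.lstrip (PySem.Str.slice line (some 8) none)] rest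
    else if PySem.Str.startswith line "[LEARNER]" then
      pvSegsOpen false [PySem.Str.lstrip (PySem.Str.slice line (some 9) none)] rest
    else pvSegsNone rest

theorem group_open (lines : List String) : ∀ (ds : List (Bool × List String)) (k : Bool) (b : List String),
    lines.foldl pvGroupStep (ds ++ [(k, b)]) = ds ++ pvSegsOpen k b lines := by
  induction lines with
  | nil => intro ds k b; simp [pvSegsOpen]
  | cons line rest ih =>
    intro ds k b
    simp only [List.foldl_cons, pvGroupStep, pvSegsOpen]
    split_ifs with h1 h2
    · rw [ih (ds ++ [(k, b)])]; simp
    · rw [ih (ds ++ [(k, b)])]; simp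
    · simp only [List.getLast?_concat, List.dropLast_concat]
      exact ih ds k (b ++ [line])

theorem group_none (lines : List String) :
    lines.foldl pvGroupStep [] = pvSegsNone lines := by
  induction lines with
  | nil => rfl
  | cons line rest ih =>
    simp only [List.foldl_cons, pvGroupStep, pvSegsNone]
    split_ifs with h1 h2
    · exact group_open rest [] _ _
    · exact group_open rest [] _ _
    · exact ih

theorem flush_eq_render (k : Bool) (b m l : List String) :
    pvFlushA (some k) b m l = pvRenderStep (m, l) (k, b) := rfl

theorem loopA_open (lines : List String) : ∀ (k : Bool) (b m l : List String),
    pvLoopA lines m l (some k) b = (pvSegsOpen k b lines).foldl pvRenderStep (m, l) := by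
  induction lines with
  | nil =>
    intro k b m l
    simp only [pvLoopA, pvSegsOpen, List.foldl_cons, List.foldl_nil]
    exact flush_eq_render k b m l
  | cons line rest ih =>
    intro k b m l
    simp only [pvLoopA, pvSegsOpen]
    split_ifs with h1 h2
    · rw [ih, List.foldl_cons, ← flush_eq_render]
    · rw [ih, List.foldl_cons, ← flush_eq_render]
    · exact ih k (b ++ [line]) m l

theorem loopA_none (lines : List String) : ∀ (m l buf : List String),
    pvLoopA lines m l none buf = (pvSegsNone lines).foldl pvRenderStep (m, l) := by
  induction lines with
  | nil => intro m l buf; rfl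
  | cons line rest ih =>
    intro m l buf
    simp only [pvLoopA, pvSegsNone]
    split_ifs with h1 h2
    · exact loopA_open rest _ _ m l
    · exact loopA_open rest _ _ m l
    · exact ih m l buf

-- ===== VERDICT (by name: the statement is the Claim_ definition above) =====
theorem split_into_turns_py_spec : Claim_equal_split_into_turns_py := by
  intro text _
  unfold Spec_split_into_turns_py split_into_turns_py split_into_turns_py_alt
  rw [group_none, loopA_none]
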